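-- pv_equiv track=rewrite | github.com/flameworks/JaneStreetPuzzles | 201911 Nov - Hooks 6/advNov.py | getNumArr
-- ===== SOURCE A (Python) =====
-- def gcd(x, y):
--     while y != 0: (x, y) = (y, x % y)
--     return x
--
-- def getNumArr(splitCoord,rowArr,direction,action):
--     if not direction: rowArr.reverse()
--     gcdNum = 0; prodNum = 1; temp = 0
--     for idx in range(9):
--         num = rowArr[idx]
--         if idx in splitCoord or num <= 0:
--             if temp != 0: prodNum *= temp
--             if not action: gcdNum = gcd(gcdNum,temp)
--             temp = 0
--         else:
--             temp = temp * 10 + num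
--     if temp != 0: prodNum *= temp
--     if not action: gcdNum = gcd(gcdNum,temp)
--     if not direction: rowArr.reverse()
--     if action: return prodNum
--     return gcdNum
-- ===== SOURCE B (Python) =====
-- def gcd(x, y):
--     while y != 0: (x, y) = (y, x % y)
--     return x
--
-- def getNumArr(splitCoord, rowArr, direction, action):
--     n = len(rowArr)
--     def cell(i):
--         return rowArr[i] if direction else rowArr[n - 1 - i]
--     # Phase 1: keep-mask over the 9 cells (no mutation of rowArr).
--     keep = [i not in splitCoord and cell(i) > 0 for i in range(9)]
--     # Phase 2: two-pointer segmentation into maximal kept runs;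
--     # each run's number is a positional sum digit * 10**place.
--     groups = []
--     i = 0
--     while i < 9:
--         if not keep[i]:
--             i += 1
--             continue
--         j = i
--         while j < 9 and keep[j]:
--             j += 1
--         val = 0
--         for k in range(i, j):
--             val += cell(k) * 10 ** (j - 1 - k)
--         groups.append(val)
--         i = j
--     # Phase 3: plain fold over the (all-positive) run values.
--     if action:
--         res = 1
--         for g in groups:
--             res *= g
--         return res
--     res = 0
--     for g in groups:
--         res = gcd(res, g)
--     return res
-- ===== Notes on version B (the rewrite author's own statement) =====
-- stated objective: alternative
-- what changed: B precomputes a keep-mask over the 9 cells (indexing from the end instead of reversing in place), segments it into maximal kept runs with a two-pointer scan, evaluates each run as a positional sum digit*10**place, and then plainly folds the all-positive run values with product or gcd; A makes one pass with a running Horner accumulator (temp*10+num) and interleaved product/gcd updates over the twice-reversed array.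
import Mathlib
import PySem

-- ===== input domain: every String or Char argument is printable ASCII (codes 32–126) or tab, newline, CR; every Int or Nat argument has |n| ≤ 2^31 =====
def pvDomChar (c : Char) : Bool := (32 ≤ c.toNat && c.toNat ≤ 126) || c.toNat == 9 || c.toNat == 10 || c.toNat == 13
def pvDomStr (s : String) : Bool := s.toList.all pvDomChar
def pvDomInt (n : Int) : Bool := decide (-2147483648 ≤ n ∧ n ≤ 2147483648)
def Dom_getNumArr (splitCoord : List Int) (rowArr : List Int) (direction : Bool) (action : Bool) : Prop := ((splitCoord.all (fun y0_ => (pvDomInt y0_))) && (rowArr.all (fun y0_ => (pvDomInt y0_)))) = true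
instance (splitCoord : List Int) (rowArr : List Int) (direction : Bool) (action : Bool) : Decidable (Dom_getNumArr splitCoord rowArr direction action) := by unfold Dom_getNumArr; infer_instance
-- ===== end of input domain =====

-- B builds a keep-mask over the 9 cells (indexing from the end instead of A's
-- in-place double reversal), segments it into maximal kept runs with a
-- two-pointer scan, evaluates each run as a positional sum digit*10^place, and
-- folds the run values with a plain product or gcd (objective: alternative
-- decomposition, no mutation). A's two in-place reversals cancel, so its net
-- side effect is nil; the equivalence proved is about the return value.

-- Python's gcd helper (Euclid with floor-mod), shared by both sources.
def pyGcd (x y : Int) : Int :=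
  if h : y = 0 then x else pyGcd y (PySem.Int.mod x y)
termination_by y.natAbs
decreasing_by
  rcases lt_or_gt_of_ne h with hy | hy
  · have := PySem.Int.mod_neg_bounds x hy
    omega
  · have h1 := PySem.Int.mod_nonneg x hy
    have h2 := PySem.Int.mod_lt x hy
    omega

-- ===== PORT A =====
def getNumArr (splitCoord : List Int) (rowArr : List Int) (direction : Bool) (action : Bool) : Int :=
  let arr := if direction then rowArr else rowArr.reverse
  let s := (PySem.List.pyRange 0 9 1).foldl (fun (s : Int × Int × Int) idx =>
      let num := PySem.List.pyGetD arr idx 0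
      if idx ∈ splitCoord ∨ num ≤ 0 then
        (if action = false then pyGcd s.1 s.2.2 else s.1,
         if s.2.2 ≠ 0 then s.2.1 * s.2.2 else s.2.1,
         0)
      else (s.1, s.2.1, s.2.2 * 10 + num)) (0, 1, 0)
  let prodNum := if s.2.2 ≠ 0 then s.2.1 * s.2.2 else s.2.1
  let gcdNum := if action = false then pyGcd s.1 s.2.2 else s.1
  if action then prodNum else gcdNum

-- ===== PORT B =====
-- Source B's inner `while j < 9 and keep[j]` / `i = j` two-pointer scan, on the
-- list of (keep, value) cells: the run taken and the rest skipped.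
def takeRun : List (Bool × Int) → List Int
  | [] => []
  | c :: r => if c.1 then c.2 :: takeRun r else []

def dropRun : List (Bool × Int) → List (Bool × Int)
  | [] => []
  | c :: r => if c.1 then dropRun r else c :: r

lemma dropRun_length_le (l : List (Bool × Int)) : (dropRun l).length ≤ l.length := by
  induction l with
  | nil => simp [dropRun]
  | cons c r ih =>
    by_cases h : c.1 <;> simp [dropRun, h]
    omega

-- Source B's `for k in range(i, j): val += cell(k) * 10 ** (j - 1 - k)`:
-- L is the run's end position j-i, t the current offset k-i.
def segVal (L : Nat) : List Int → Nat → Int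
  | [], _ => 0
  | d :: r, t => d * (10 : Int) ^ (L - 1 - t) + segVal L r (t + 1)

-- Source B's outer `while i < 9` loop: skip unkept cells, emit each run's value.
def segGroups : List (Bool × Int) → List Int
  | [] => []
  | c :: r =>
    if c.1 then
      segVal (c.2 :: takeRun r).length (c.2 :: takeRun r) 0 :: segGroups (dropRun r)
    else segGroups r
termination_by l => l.length
decreasing_by
  · have := dropRun_length_le r; simp; omega
  · simp

def getNumArr_alt (splitCoord : List Int) (rowArr : List Int) (direction : Bool) (action : Bool) : Int :=
  let n : Int := rowArr.length
  let cell : Int → Int := fun i =>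
    if direction then PySem.List.pyGetD rowArr i 0 else PySem.List.pyGetD rowArr (n - 1 - i) 0
  let cells := (PySem.List.pyRange 0 9 1).map
    (fun i => ((!decide (i ∈ splitCoord)) && decide (0 < cell i), cell i))
  let groups := segGroups cells
  if action then groups.foldl (· * ·) 1 else groups.foldl pyGcd 0

-- ===== PRECONDITION & SPEC =====
-- Pre_ excludes exactly the inputs with fewer than 9 cells, on which A raises IndexError.
def Pre_getNumArr (splitCoord : List Int) (rowArr : List Int) (direction : Bool) (action : Bool) : Prop :=
  9 ≤ rowArr.length
instance (splitCoord : List Int) (rowArr : List Int) (direction : Bool) (action : Bool) : Decidable (Pre_getNumArr splitCoord rowArr direction action) := by unfold Pre_getNumArr; infer_instance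

def pvWitness_getNumArr : List Int × List Int × Bool × Bool :=
  ([2, 5], [1, 2, 3, 0, 4, 5, 6, 7, 8], false, true)

def Spec_getNumArr (splitCoord : List Int) (rowArr : List Int) (direction : Bool) (action : Bool) (out : Int) : Prop := out = getNumArr_alt splitCoord rowArr direction action
instance (splitCoord : List Int) (rowArr : List Int) (direction : Bool) (action : Bool) (out : Int) : Decidable (Spec_getNumArr splitCoord rowArr direction action out) := by unfold Spec_getNumArr; infer_instance

-- ===== CLAIM (what is proved, stated in full; the proofs are below) =====
def Claim_equal_getNumArr : Prop := ∀ (splitCoord : List Int) (rowArr : List Int) (direction : Bool) (action : Bool), Dom_getNumArr splitCoord rowArr direction action → Pre_getNumArr splitCoord rowArr direction action → Spec_getNumArr splitCoord rowArr direction action (getNumArr splitCoord rowArr direction action)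

-- ===== LEMMAS AND PROOFS =====

-- A's loop step over (keep, value) cells (ac = the Python `action` argument).
def stepA (ac : Bool) (s : Int × Int × Int) (c : Bool × Int) : Int × Int × Int :=
  if c.1 = false then
    (if ac = false then pyGcd s.1 s.2.2 else s.1,
     if s.2.2 ≠ 0 then s.2.1 * s.2.2 else s.2.1,
     0)
  else (s.1, s.2.1, s.2.2 * 10 + c.2)

-- The list of group-numbers A's loop produces from a cell list, starting with
-- partial group t (includes every break's group, possibly 0, and the final one).
def groupsOf : List (Bool × Int) → Int → List Int
  | [], t => [t]
  | c :: r, t => if c.1 = false then t :: groupsOf r 0 else groupsOf r (t * 10 + c.2)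

-- Horner accumulation, A's temp.
def horner (t : Int) : List Int → Int
  | [] => t
  | d :: r => horner (t * 10 + d) r

lemma bridgeA (sc : List Int) (arr : List Int) (ac : Bool) (idxs : List Int)
    (init : Int × Int × Int) :
    idxs.foldl (fun (s : Int × Int × Int) idx =>
      let num := PySem.List.pyGetD arr idx 0
      if idx ∈ sc ∨ num ≤ 0 then
        (if ac = false then pyGcd s.1 s.2.2 else s.1,
         if s.2.2 ≠ 0 then s.2.1 * s.2.2 else s.2.1,
         0)
      else (s.1, s.2.1, s.2.2 * 10 + num)) init
    = (idxs.map (fun i => ((!decide (i ∈ sc)) && decide (0 < PySem.List.pyGetD arr i 0),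
        PySem.List.pyGetD arr i 0))).foldl (stepA ac) init := by
  rw [List.foldl_map]
  congr 1
  funext s i
  by_cases h1 : i ∈ sc
  · simp [stepA, h1]
  · by_cases h2 : PySem.List.pyGetD arr i 0 ≤ 0
    · simp [stepA, h1, h2, not_lt.mpr h2]
    · simp [stepA, h1, h2, lt_of_not_ge h2]

lemma aProd (l : List (Bool × Int)) : ∀ p g t : Int,
    (if (l.foldl (stepA true) (g, p, t)).2.2 ≠ 0
     then (l.foldl (stepA true) (g, p, t)).2.1 * (l.foldl (stepA true) (g, p, t)).2.2
     else (l.foldl (stepA true) (g, p, t)).2.1)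
    = (groupsOf l t).foldl (fun p g => if g ≠ 0 then p * g else p) p := by
  induction l with
  | nil => intro p g t; simp [groupsOf]
  | cons c r ih =>
    intro p g t
    by_cases h : c.1 = false
    · simp [groupsOf, stepA, h, ih]
    · simp [groupsOf, stepA, h, ih]

lemma aGcd (l : List (Bool × Int)) : ∀ g p t : Int,
    pyGcd (l.foldl (stepA false) (g, p, t)).1 (l.foldl (stepA false) (g, p, t)).2.2
    = (groupsOf l t).foldl pyGcd g := by
  induction l with
  | nil => intro g p t; simp [groupsOf]
  | cons c r ih =>
    intro g p t
    by_cases h : c.1 = false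
    · simp [groupsOf, stepA, h, ih]
    · simp [groupsOf, stepA, h, ih]

-- Reading the reversed array at i is reading the original from the end.
lemma revGet (rowArr : List Int) (i : Int) (h0 : 0 ≤ i) (h9 : i < 9)
    (hlen : 9 ≤ rowArr.length) :
    PySem.List.pyGetD rowArr.reverse i 0
      = PySem.List.pyGetD rowArr ((rowArr.length : Int) - 1 - i) 0 := by
  rw [PySem.List.pyGetD_eq_getElem rowArr.reverse 0 h0 (by simp; omega),
      PySem.List.pyGetD_eq_getElem rowArr 0 (by omega) (by omega)]
  rw [List.getElem_reverse]
  congr 1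
  omega

-- Both ports read the same 9 (keep, value) cells.
lemma cellsEq (sc : List Int) (rowArr : List Int) (direction : Bool)
    (hlen : 9 ≤ rowArr.length) :
    ((PySem.List.pyRange 0 9 1).map (fun i =>
      ((!decide (i ∈ sc)) && decide (0 < PySem.List.pyGetD (if direction then rowArr else rowArr.reverse) i 0),
       PySem.List.pyGetD (if direction then rowArr else rowArr.reverse) i 0)))
    = (PySem.List.pyRange 0 9 1).map (fun i =>
        ((!decide (i ∈ sc)) && decide (0 < (if direction then PySem.List.pyGetD rowArr i 0
            else PySem.List.pyGetD rowArr ((rowArr.length : Int) - 1 - i) 0)),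
         if direction then PySem.List.pyGetD rowArr i 0
           else PySem.List.pyGetD rowArr ((rowArr.length : Int) - 1 - i) 0)) := by
  cases direction
  · have hr : PySem.List.pyRange 0 9 1 = [0,1,2,3,4,5,6,7,8] := by decide
    rw [hr]
    simp only [List.map, Bool.false_eq_true, if_false]
    norm_num [revGet rowArr 0 (by norm_num) (by norm_num) hlen, revGet rowArr 1 (by norm_num) (by norm_num) hlen, revGet rowArr 2 (by norm_num) (by norm_num) hlen, revGet rowArr 3 (by norm_num) (by norm_num) hlen, revGet rowArr 4 (by norm_num) (by norm_num) hlen, revGet rowArr 5 (by norm_num) (by norm_num) hlen, revGet rowArr 6 (by norm_num) (by norm_num) hlen, revGet rowArr 7 (by norm_num) (by norm_num) hlen, revGet rowArr 8 (by norm_num) (by norm_num) hlen]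
  · simp

-- horner peels its accumulator off as the leading power.
lemma horner_shift (r : List Int) : ∀ a : Int, horner a r = a * 10 ^ r.length + horner 0 r := by
  induction r with
  | nil => intro a; simp [horner]
  | cons d t ih =>
    intro a
    simp only [horner, List.length_cons]
    rw [ih (a * 10 + d), ih (0 * 10 + d)]
    ring

-- The positional-sum loop computes the Horner value of the run.
lemma segVal_eq_horner (r : List Int) : ∀ (L t : Nat), L = t + r.length →
    segVal L r t = horner 0 r := by
  induction r with
  | nil => intro L t h; simp [segVal, horner]
  | cons d s ih =>
    intro L t h
    simp only [segVal, horner]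
    rw [ih L (t + 1) (by simp at h; omega), horner_shift s (0 * 10 + d)]
    have : L - 1 - t = s.length := by simp at h; omega
    rw [this]
    ring

-- Mid-run invariant: with a positive partial group t, A's remaining groups are
-- the Horner completion of the current run followed by the later runs' values;
-- start case: A's nonzero groups are exactly B's run values.
lemma groups_core (n : Nat) : ∀ l : List (Bool × Int), l.length = n →
    (∀ c ∈ l, c.1 = true → 0 < c.2) →
    ((groupsOf l 0).filter (fun g => g ≠ 0) = segGroups l ∧
     ∀ t : Int, 0 < t →
       (groupsOf l t).filter (fun g => g ≠ 0) = horner t (takeRun l) :: segGroups (dropRun l)) := by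
  induction n using Nat.strong_induction_on with
  | _ n ih =>
    intro l hn hpos
    match l, hn with
    | [], _ =>
      constructor
      · simp [groupsOf, segGroups]
      · intro t ht
        simp [groupsOf, takeRun, dropRun, horner, segGroups, ne_of_gt ht]
    | c :: r, hn =>
      have hr : r.length < n := by simp at hn; omega
      have hposr : ∀ x ∈ r, x.1 = true → 0 < x.2 := fun x hx => hpos x (by simp [hx])
      have IH := ih r.length hr r rfl hposr
      constructor
      · by_cases h : c.1
        · have hc2 : 0 < c.2 := hpos c (by simp) h
          simp only [groupsOf, h]
          rw [if_neg (by simp), show (0 : Int) * 10 + c.2 = c.2 from by ring, IH.2 c.2 hc2]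
          simp only [segGroups, h, if_true]
          congr 1
          rw [segVal_eq_horner _ _ 0 (by simp)]
          simp [horner]
        · have h' : c.1 = false := by simpa using h
          simp only [groupsOf, h', segGroups]
          rw [if_pos trivial, if_neg (by simp), List.filter_cons, if_neg (by simp)]
          exact IH.1
      · intro t ht
        by_cases h : c.1
        · have hc2 : 0 < c.2 := hpos c (by simp) h
          simp only [groupsOf, h, takeRun, dropRun]
          rw [if_neg (by simp), if_pos trivial, if_pos trivial, IH.2 (t * 10 + c.2) (by omega)]
          simp [horner]
        · have h' : c.1 = false := by simpa using h
          have hseg : segGroups (c :: r) = segGroups r := by simp [segGroups, h']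
          simp only [groupsOf, h', takeRun, dropRun]
          rw [if_pos trivial, if_neg (by simp), if_neg (by simp), hseg,
              List.filter_cons, if_pos (by simp [ne_of_gt ht]), IH.1]
          simp [horner]

-- The guarded product over all groups is the plain product over the nonzero ones.
lemma prod_filter (gs : List Int) : ∀ p : Int,
    gs.foldl (fun p g => if g ≠ 0 then p * g else p) p
      = (gs.filter (fun g => g ≠ 0)).foldl (· * ·) p := by
  induction gs with
  | nil => intro p; simp
  | cons g r ih =>
    intro p
    rw [List.foldl_cons, List.filter_cons]
    by_cases h : g = 0
    · rw [if_neg (not_not_intro h), if_neg (by simp [h])]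
      exact ih p
    · rw [if_pos h, if_pos (by simpa using h), List.foldl_cons]
      exact ih (p * g)

lemma pyGcd_zero (a : Int) : pyGcd a 0 = a := by rw [pyGcd]; simp

-- Zero groups are gcd no-ops, so the gcd fold ignores the filter.
lemma gcd_filter (gs : List Int) : ∀ a : Int,
    gs.foldl pyGcd a = (gs.filter (fun g => g ≠ 0)).foldl pyGcd a := by
  induction gs with
  | nil => intro a; simp
  | cons g r ih =>
    intro a
    rw [List.foldl_cons, List.filter_cons]
    by_cases h : g = 0
    · rw [if_neg (by simp [h]), h, pyGcd_zero]
      exact ih a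
    · rw [if_pos (by simpa using h), List.foldl_cons]
      exact ih (pyGcd a g)

lemma cells_pos (sc : List Int) (f : Int → Int) (idxs : List Int) :
    ∀ c ∈ idxs.map (fun i => ((!decide (i ∈ sc)) && decide (0 < f i), f i)),
      c.1 = true → 0 < c.2 := by
  intro c hc h
  rcases List.mem_map.mp hc with ⟨i, _, rfl⟩
  simpa using (Bool.and_elim_right h)

theorem getNumArr_spec : Claim_equal_getNumArr := by
  intro sc rowArr direction action _ hpre
  have hlen : 9 ≤ rowArr.length := hpre
  unfold Spec_getNumArr getNumArr getNumArr_alt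
  dsimp only
  rw [bridgeA sc (if direction then rowArr else rowArr.reverse) action (PySem.List.pyRange 0 9 1) (0, 1, 0)]
  rw [cellsEq sc rowArr direction hlen]
  set l := (PySem.List.pyRange 0 9 1).map (fun i =>
      ((!decide (i ∈ sc)) && decide (0 < (if direction then PySem.List.pyGetD rowArr i 0
          else PySem.List.pyGetD rowArr ((rowArr.length : Int) - 1 - i) 0)),
       if direction then PySem.List.pyGetD rowArr i 0
         else PySem.List.pyGetD rowArr ((rowArr.length : Int) - 1 - i) 0)) with hl
  have hpos : ∀ c ∈ l, c.1 = true → 0 < c.2 := by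
    rw [hl]; exact cells_pos sc _ _
  have hcore := (groups_core l.length l rfl hpos).1
  cases action
  · simp only [Bool.false_eq_true, if_false]
    rw [aGcd l 0 1 0, gcd_filter, hcore]
    simp
  · simp only [if_true]
    rw [aProd l 1 0 0, prod_filter, hcore]
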